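-- pv_equiv track=rewrite | github.com/mechanist01/gmail-noiser | tracker_scanner.py | is_promotional_link
-- ===== SOURCE A (Python) =====
-- def is_promotional_link(url: str, email_content: str) -> bool:
--     """Determine if a URL is likely a promotional or marketing link"""
--     promo_indicators = [
--         r'offer', r'deal', r'discount', r'save', r'sale', r'promo',
--         r'buy', r'shop', r'order', r'purchase', r'subscribe',
--         r'campaign', r'special', r'limited', r'exclusive', r'marketing',
--         r'newsletter', r'unsubscribe', r'click', r'track', r'analytics',
--         r'product', r'store', r'marketplace', r'cart', r'checkout',
--         r'catalog', r'collection', r'brand', r'partner'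
--     ]
--
--     url_lower = url.lower()
--
--     # Check URL structure
--     if any(indicator in url_lower for indicator in promo_indicators):
--         return True
--
--     # Check surrounding content (simplified)
--     content_lower = email_content.lower()
--     url_index = content_lower.find(url_lower)
--     if url_index != -1:
--         # Check content around the URL
--         window_size = 100
--         start = max(0, url_index - window_size)
--         end = min(len(content_lower), url_index + window_size)
--         surrounding_content = content_lower[start:end]
--
--         if any(indicator in surrounding_content for indicator in promo_indicators):
--             return True
--
--     return False
-- ===== SOURCE B (Python) =====
-- _PROMO = [
--     'offer', 'deal', 'discount', 'save', 'sale', 'promo',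
--     'buy', 'shop', 'order', 'purchase', 'subscribe',
--     'campaign', 'special', 'limited', 'exclusive', 'marketing',
--     'newsletter', 'unsubscribe', 'click', 'track', 'analytics',
--     'product', 'store', 'marketplace', 'cart', 'checkout',
--     'catalog', 'collection', 'brand', 'partner'
-- ]
--
-- # Keywords grouped by first letter, built once: the scan below only tries
-- # keywords that can possibly start at the current position.
-- _BY_FIRST = {}
-- for _w in _PROMO:
--     _BY_FIRST.setdefault(_w[0], []).append(_w)
--
--
-- def _has_promo(text):
--     """One left-to-right pass; at position i only the first-letter bucket is tried."""
--     for i, c in enumerate(text):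
--         for w in _BY_FIRST.get(c, ()):
--             if text.startswith(w, i):
--                 return True
--     return False
--
--
-- def is_promotional_link(url: str, email_content: str) -> bool:
--     url_lower = url.lower()
--     content_lower = email_content.lower()
--     i = content_lower.find(url_lower)
--     # the texts any promo keyword may legitimately be found in:
--     # the URL itself, plus (when the URL occurs in the content) the +/-100 window
--     texts = [url_lower]
--     if i != -1:
--         texts.append(content_lower[max(0, i - 100): i + 100])
--     return any(_has_promo(t) for t in texts)
-- ===== Notes on version B (the rewrite author's own statement) =====
-- stated objective: alternative
-- what changed: Replaces the two staged per-keyword any(ind in text) scans (29 passes over each text) by: (1) a candidate-texts list built up front (the lowercased URL, plus the +/-100 content window when the URL occurs in the content, sliced without the explicit min/len clamp) and (2) a single left-to-right positional scan over each text with the keywords pre-grouped by first letter in a dict, testing startswith only for the bucket of the current character.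
import Mathlib
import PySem

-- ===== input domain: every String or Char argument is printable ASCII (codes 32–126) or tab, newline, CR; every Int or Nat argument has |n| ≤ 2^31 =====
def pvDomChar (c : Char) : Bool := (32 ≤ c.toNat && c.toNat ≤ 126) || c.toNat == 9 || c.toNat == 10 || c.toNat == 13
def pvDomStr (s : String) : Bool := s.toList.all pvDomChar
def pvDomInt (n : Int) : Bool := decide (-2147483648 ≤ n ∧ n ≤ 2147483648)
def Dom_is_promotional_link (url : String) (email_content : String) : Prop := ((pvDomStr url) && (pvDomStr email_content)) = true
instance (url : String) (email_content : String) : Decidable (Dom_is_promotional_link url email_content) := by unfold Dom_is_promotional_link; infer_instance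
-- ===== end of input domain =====

-- B builds the list of texts to inspect up front and replaces the 29 per-keyword
-- substring scans by one left-to-right pass with a first-letter dict of the keywords
-- (alternative decomposition, same observable result).

-- ===== PORT A =====
def promo_indicators : List String :=
  ["offer", "deal", "discount", "save", "sale", "promo",
   "buy", "shop", "order", "purchase", "subscribe",
   "campaign", "special", "limited", "exclusive", "marketing",
   "newsletter", "unsubscribe", "click", "track", "analytics",
   "product", "store", "marketplace", "cart", "checkout",
   "catalog", "collection", "brand", "partner"]

def is_promotional_link (url : String) (email_content : String) : Bool :=
  let url_lower := PySem.Str.lower url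
  if promo_indicators.any (fun ind => PySem.Str.isIn ind url_lower) then true
  else
    let content_lower := PySem.Str.lower email_content
    let url_index := PySem.Str.find content_lower url_lower
    if url_index ≠ -1 then
      let start := max 0 (url_index - 100)
      let stop := min (PySem.Str.len content_lower) (url_index + 100)
      let surrounding_content := PySem.Str.slice content_lower (some start) (some stop)
      if promo_indicators.any (fun ind => PySem.Str.isIn ind surrounding_content) then true
      else false
    else false

-- ===== PORT B =====
def pvPromoWords : List String :=
  ["offer", "deal", "discount", "save", "sale", "promo",
   "buy", "shop", "order", "purchase", "subscribe",
   "campaign", "special", "limited", "exclusive", "marketing",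
   "newsletter", "unsubscribe", "click", "track", "analytics",
   "product", "store", "marketplace", "cart", "checkout",
   "catalog", "collection", "brand", "partner"]

-- _BY_FIRST: keywords grouped by first letter (w[0] of each nonempty literal keyword
-- is taken as w.toList.headD ' '; the setdefault/append of Source B is Dict.modify).
def pvByFirst : PySem.Dict Char (List String) :=
  (pvPromoWords.map (fun w => (w.toList.headD ' ', w))).foldl
    (fun d p => d.modify p.1 [] (fun g => g ++ [p.2])) PySem.Dict.empty

-- _has_promo: scan positions left to right (recursion on the suffix); text.startswith(w, i)
-- is startswith of the suffix starting at i.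
def pvScanGo : List Char → Bool
  | [] => false
  | c :: rest =>
    (pvByFirst.getD c []).any (fun w => PySem.Chars.startswith (c :: rest) w.toList)
      || pvScanGo rest

-- texts = [url_lower] (+ the window when the URL occurs); any(_has_promo(t) for t in texts)
def is_promotional_link_alt (url : String) (email_content : String) : Bool :=
  let u := PySem.Str.lower url
  let c := PySem.Str.lower email_content
  let i := PySem.Str.find c u
  let texts :=
    if i ≠ -1 then [u, PySem.Str.slice c (some (max 0 (i - 100))) (some (i + 100))]
    else [u]
  texts.any (fun t => pvScanGo t.toList)

-- ===== PRECONDITION & SPEC =====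
def Spec_is_promotional_link (url : String) (email_content : String) (out : Bool) : Prop := out = is_promotional_link_alt url email_content
instance (url : String) (email_content : String) (out : Bool) : Decidable (Spec_is_promotional_link url email_content out) := by unfold Spec_is_promotional_link; infer_instance

-- ===== CLAIM (what is proved, stated in full; the proofs are below) =====
def Claim_equal_is_promotional_link : Prop := ∀ (url : String) (email_content : String), Dom_is_promotional_link url email_content → Spec_is_promotional_link url email_content (is_promotional_link url email_content)

-- ===== LEMMAS AND PROOFS =====

lemma pvPromo_ne_nil : ∀ w ∈ pvPromoWords, w.toList ≠ [] := by decide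

lemma pvGroup_getD (c : Char) :
    pvByFirst.getD c [] = pvPromoWords.filter (fun w => w.toList.headD ' ' == c) := by
  unfold pvByFirst
  rw [PySem.Dict.getD_foldl_modify_append]
  simp [List.filter_map, List.map_map, Function.comp_def]

lemma pvScan_iff (t : List Char) :
    pvScanGo t = true ↔ ∃ w ∈ pvPromoWords, w.toList <:+: t := by
  induction t with
  | nil =>
    constructor
    · intro h
      simp [pvScanGo] at h
    · rintro ⟨w, hw, hinf⟩
      exact absurd (List.eq_nil_of_infix_nil hinf) (pvPromo_ne_nil w hw)
  | cons c t ih =>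
    simp only [pvScanGo, Bool.or_eq_true, List.any_eq_true, pvGroup_getD, List.mem_filter,
      PySem.Chars.startswith_iff, ih]
    constructor
    · rintro (⟨w, ⟨hw, _⟩, hpre⟩ | ⟨w, hw, hinf⟩)
      · exact ⟨w, hw, List.infix_cons_iff.mpr (Or.inl hpre)⟩
      · exact ⟨w, hw, List.infix_cons_iff.mpr (Or.inr hinf)⟩
    · rintro ⟨w, hw, hinf⟩
      rcases List.infix_cons_iff.mp hinf with hpre | hinf'
      · left
        refine ⟨w, ⟨hw, ?_⟩, hpre⟩
        obtain ⟨r, hr⟩ := hpre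
        cases hwl : w.toList with
        | nil => exact absurd hwl (pvPromo_ne_nil w hw)
        | cons a as =>
          rw [hwl, List.cons_append] at hr
          have ha : a = c := (List.cons.injEq _ _ _ _ ▸ hr).1
          simp [ha]
      · exact Or.inr ⟨w, hw, hinf'⟩

lemma pvScan_eq_any (cs : List Char) :
    pvScanGo cs = pvPromoWords.any (fun w => PySem.Chars.isIn w.toList cs) := by
  rw [Bool.eq_iff_iff, pvScan_iff]
  simp [List.any_eq_true, PySem.Chars.isIn_iff_infix]

-- B slices with stop i+100 (uncapped); slicing is clamped drop/take, so capping the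
-- stop at the length (as A does) changes nothing.
lemma pvClampIdx_min (n : Nat) (b : Int) :
    PySem.List.clampIdx n (min (n : Int) b) = PySem.List.clampIdx n b := by
  simp only [PySem.List.clampIdx]
  split_ifs <;> omega

lemma pvStrSlice_min_stop (s : String) (a b : Int) :
    PySem.Str.slice s (some a) (some (min (PySem.Str.len s) b)) =
      PySem.Str.slice s (some a) (some b) := by
  simp only [PySem.Str.slice, PySem.Str.len, PySem.Chars.slice_eq_listSlice,
    PySem.List.slice, pvClampIdx_min]

-- pvScanGo on a string equals A's 29 per-keyword membership tests on that string.
lemma pvScan_str (s : String) :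
    pvScanGo s.toList = promo_indicators.any (fun ind => PySem.Str.isIn ind s) := by
  rw [pvScan_eq_any]
  rfl

-- ===== VERDICT (by name: the statement is the Claim_ definition above) =====
theorem is_promotional_link_spec : Claim_equal_is_promotional_link := by
  intro url email _
  unfold Spec_is_promotional_link
  simp only [is_promotional_link, is_promotional_link_alt, pvScan_str]
  by_cases hf : PySem.Str.find (PySem.Str.lower email) (PySem.Str.lower url) = -1
  · simp only [hf]
    simp
    rw [Bool.eq_iff_iff]
    simp [List.any_eq_true]
  · simp only [hf, ne_eq, not_false_eq_true, if_true, List.any_cons,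
      List.any_nil, Bool.or_false, pvStrSlice_min_stop]
    split_ifs <;> simp_all
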